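-- pv_equiv track=rewrite | github.com/NotVeryGoodPythonUser/predstaveni | predstaveni.py | control_line
-- ===== SOURCE A (Python) =====
-- def control_line(line):
--     symbol = 0
--     count = 0
--     for pole in line:
--         if pole == symbol:
--             count += 1
--         else:
--             symbol = pole
--             count = 1
--         if count == 4 and symbol !=0:
--             return(symbol)
-- ===== SOURCE B (Python) =====
-- def control_line(line):
--     # sliding window: pair each element with the next three via shifted copies;
--     # the first window of four equal non-zero values gives the answer
--     for a, b, c, d in zip(line, line[1:], line[2:], line[3:]):
--         if a != 0 and a == b == c == d:
--             return a
-- ===== Notes on version B (the rewrite author's own statement) =====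
-- stated objective: idiomatic
-- what changed: Replaces A's symbol/count state machine with a stateless sliding-window test: zip the list with its three shifted copies and return the first window of four equal non-zero elements.
import Mathlib
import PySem

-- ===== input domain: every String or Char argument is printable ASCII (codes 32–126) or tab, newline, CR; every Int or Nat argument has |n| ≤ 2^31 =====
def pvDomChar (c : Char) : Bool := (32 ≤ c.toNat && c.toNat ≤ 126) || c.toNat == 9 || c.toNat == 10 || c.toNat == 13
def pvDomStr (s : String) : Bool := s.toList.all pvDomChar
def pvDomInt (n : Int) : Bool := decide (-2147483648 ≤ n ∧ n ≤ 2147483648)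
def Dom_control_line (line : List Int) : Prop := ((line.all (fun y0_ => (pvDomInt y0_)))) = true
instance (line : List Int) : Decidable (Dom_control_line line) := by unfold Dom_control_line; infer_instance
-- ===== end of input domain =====

-- B replaces A's symbol/count state machine with a stateless sliding-window test
-- over windows of four consecutive elements (idiomatic decomposition, same cost).

-- ===== PORT A =====
-- A's for-loop with early return, carrying (symbol, count)
def controlGo (symbol : Int) (count : Int) : List Int → Option Int
  | [] => none
  | pole :: rest =>
    let (symbol', count') := if pole = symbol then (symbol, count + 1) else (pole, 1)
    if count' = 4 ∧ symbol' ≠ 0 then some symbol' else controlGo symbol' count' rest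

def control_line (line : List Int) : Option Int := controlGo 0 0 line

-- ===== PORT B =====
-- Source B iterates the windows (line[i], line[i+1], line[i+2], line[i+3]) produced by
-- zipping the list with its three shifted copies; the head pattern below IS the
-- current window and the recursive call moves the window one step right.
def control_line_alt : List Int → Option Int
  | a :: b :: c :: d :: rest =>
    if a ≠ 0 ∧ b = a ∧ c = a ∧ d = a then some a
    else control_line_alt (b :: c :: d :: rest)
  | _ => none

-- ===== PRECONDITION & SPEC =====
def Spec_control_line (line : List Int) (out : Option Int) : Prop := out = control_line_alt line
instance (line : List Int) (out : Option Int) : Decidable (Spec_control_line line out) := by unfold Spec_control_line; infer_instance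

-- ===== CLAIM =====
def Claim_equal_control_line : Prop := ∀ (line : List Int), Dom_control_line line → Spec_control_line line (control_line line)

-- ===== LEMMAS AND PROOFS =====

theorem controlGo_cons_eq (x c : Int) (rest : List Int) :
    controlGo x c (x :: rest) =
      if c + 1 = 4 ∧ x ≠ 0 then some x else controlGo x (c + 1) rest := by
  simp [controlGo]

theorem controlGo_cons_ne {y x : Int} (c : Int) (rest : List Int) (h : ¬ y = x) :
    controlGo x c (y :: rest) =
      if (1 : Int) = 4 ∧ y ≠ 0 then some y else controlGo y 1 rest := by
  simp [controlGo, h]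

-- a window whose first element is 0 never fires
theorem alt_zero_cons (ys : List Int) :
    control_line_alt (0 :: ys) = control_line_alt ys := by
  match ys with
  | [] => simp [control_line_alt]
  | [b] => simp [control_line_alt]
  | [b, c] => simp [control_line_alt]
  | b :: c :: d :: rest => simp [control_line_alt]

-- a window that contains a mismatch right after its head never fires
theorem alt_ne_cons {x y : Int} (ys : List Int) (h : y ≠ x) :
    control_line_alt (x :: y :: ys) = control_line_alt (y :: ys) := by
  match ys with
  | [] => simp [control_line_alt]
  | [c] => simp [control_line_alt]
  | c :: d :: rest => rw [control_line_alt]; simp [h]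

theorem alt_ne_cons2 {x y : Int} (ys : List Int) (h : y ≠ x) :
    control_line_alt (x :: x :: y :: ys) = control_line_alt (x :: y :: ys) := by
  match ys with
  | [] => simp [control_line_alt]
  | c :: rest => rw [control_line_alt]; simp [h]

theorem alt_ne_cons3 {x y : Int} (ys : List Int) (h : y ≠ x) :
    control_line_alt (x :: x :: x :: y :: ys) = control_line_alt (x :: x :: y :: ys) := by
  rw [control_line_alt]; simp [h]

-- sliding past a short pad of x's that is followed by a different element
theorem alt_pad {x y : Int} (ys : List Int) (h : y ≠ x) :
    ∀ k : Nat, k ≤ 3 →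
      control_line_alt (List.replicate k x ++ y :: ys) = control_line_alt (y :: ys) := by
  intro k hk
  interval_cases k
  · simp
  · simpa using alt_ne_cons ys h
  · show control_line_alt (x :: x :: y :: ys) = _
    rw [alt_ne_cons2 ys h, alt_ne_cons ys h]
  · show control_line_alt (x :: x :: x :: y :: ys) = _
    rw [alt_ne_cons3 ys h, alt_ne_cons2 ys h, alt_ne_cons ys h]

-- main invariant: A's state (symbol, count) is the pad of already-seen equal elements
theorem go_both : ∀ xs : List Int,
    (∀ c : Int, controlGo 0 c xs = control_line_alt xs) ∧
    (∀ (x : Int) (k : Nat), x ≠ 0 → 1 ≤ k → k ≤ 3 →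
      controlGo x (k : Int) xs = control_line_alt (List.replicate k x ++ xs)) := by
  intro xs
  induction xs with
  | nil =>
    constructor
    · intro c; simp [controlGo, control_line_alt]
    · intro x k hx h1 h3
      interval_cases k <;> simp [controlGo, control_line_alt]
  | cons y ys ih =>
    constructor
    · intro c
      by_cases hy : y = 0
      · subst hy
        rw [controlGo_cons_eq, if_neg (by simp), ih.1, alt_zero_cons]
      · rw [controlGo_cons_ne c ys hy, if_neg (by norm_num)]
        have := ih.2 y 1 hy le_rfl (by norm_num)
        simpa using this
    · intro x k hx h1 h3
      by_cases hyx : y = x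
      · subst hyx
        rw [controlGo_cons_eq]
        by_cases h4 : (k : Int) + 1 = 4
        · rw [if_pos ⟨h4, hx⟩]
          have hk3 : k = 3 := by omega
          subst hk3
          show _ = control_line_alt (y :: y :: y :: y :: ys)
          rw [control_line_alt]
          simp [hx]
        · rw [if_neg (by intro ⟨h, _⟩; exact h4 h)]
          have hk : k + 1 ≤ 3 := by omega
          have := ih.2 y (k + 1) hx (by omega) hk
          rw [show ((k : Int) + 1) = ((k + 1 : Nat) : Int) by push_cast; ring, this]
          congr 1
          rw [List.replicate_succ' (n := k)]
          simp
      · rw [controlGo_cons_ne (k : Int) ys hyx, if_neg (by norm_num)]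
        by_cases hy0 : y = 0
        · subst hy0
          rw [ih.1, ← alt_zero_cons, alt_pad ys hyx k h3]
        · have := ih.2 y 1 hy0 le_rfl (by norm_num)
          rw [show (1 : Int) = ((1 : Nat) : Int) from rfl, this]
          simp only [List.replicate_one, List.singleton_append]
          rw [alt_pad ys hyx k h3]

theorem control_eq (line : List Int) : control_line line = control_line_alt line :=
  (go_both line).1 0

-- ===== VERDICT =====
theorem control_line_spec : Claim_equal_control_line := by
  intro line _
  exact control_eq line
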